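-- pv_equiv track=rewrite | github.com/irving-peng/FoodMenu | api/generate.py | classify_food_choices
-- ===== SOURCE A (Python) =====
-- food_category = {
--     "meat": "protein",
--     "dairy": "fat",
--     "oil": "fat",
--     "other": "carbohydrates",
--     "side": "carbohydrates",
--     "fruits": "carbohydrates",
--     "mainfood": "carbohydrates",
--     "Soups": "carbohydrates",
--     "dessert": "fat"
-- }
--
-- def classify_food_choices(food_choice):
--     categorized_foods = {
--         "carbohydrates": [],
--         "fat": [],
--         "protein": []
--     }
--
--     for category in food_choice:
--         if category in food_category:
--             nutrient_type = food_category[category]  # 获取对应的营养类别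
--             categorized_foods[nutrient_type].append(category)
--
--     return categorized_foods
-- ===== SOURCE B (Python) =====
-- food_category = {
--     "meat": "protein",
--     "dairy": "fat",
--     "oil": "fat",
--     "other": "carbohydrates",
--     "side": "carbohydrates",
--     "fruits": "carbohydrates",
--     "mainfood": "carbohydrates",
--     "Soups": "carbohydrates",
--     "dessert": "fat"
-- }
--
-- def classify_food_choices(food_choice):
--     nutrients = ("carbohydrates", "fat", "protein")
--     return {n: [c for c in food_choice if food_category.get(c) == n]
--             for n in nutrients}
-- ===== Notes on version B (the rewrite author's own statement) =====
-- stated objective: alternative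
-- what changed: Replaces A's single dispatch-and-append pass over food_choice (mutating per-nutrient buckets) by a dict comprehension over the three fixed nutrient names, each built by an independent filtering scan of food_choice.
import Mathlib
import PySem

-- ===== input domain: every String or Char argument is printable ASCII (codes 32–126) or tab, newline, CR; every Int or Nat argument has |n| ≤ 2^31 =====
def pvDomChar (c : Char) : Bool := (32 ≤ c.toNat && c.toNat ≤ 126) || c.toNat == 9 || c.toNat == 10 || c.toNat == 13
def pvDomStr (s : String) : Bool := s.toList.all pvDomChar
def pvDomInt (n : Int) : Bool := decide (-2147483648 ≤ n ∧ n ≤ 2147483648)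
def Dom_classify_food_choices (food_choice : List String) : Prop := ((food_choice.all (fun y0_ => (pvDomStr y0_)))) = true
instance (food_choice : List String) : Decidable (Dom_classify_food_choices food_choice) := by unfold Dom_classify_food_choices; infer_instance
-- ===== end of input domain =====

-- B builds each of the three nutrient buckets by its own filtering scan of food_choice
-- (a dict comprehension over the fixed nutrient names) instead of A's single
-- dispatch-and-append pass; same cost, different decomposition.


-- module-level constant food_category (shared by A and B, as in the Python module)
def foodCategory : PySem.Dict String String := PySem.Dict.mk
  [("meat", "protein"), ("dairy", "fat"), ("oil", "fat"),
   ("other", "carbohydrates"), ("side", "carbohydrates"), ("fruits", "carbohydrates"),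
   ("mainfood", "carbohydrates"), ("Soups", "carbohydrates"), ("dessert", "fat")]

-- ===== PORT A =====
-- 'if category in food_category: nutrient_type = food_category[category]; ….append' is the
-- match on get? (contains + [] lookup on a present key); list.append is (· ++ [category]);
-- Dict.modify with default [] is exact here since the looked-up key is always present.
def classify_food_choices (food_choice : List String) : List (String × List String) :=
  (food_choice.foldl
    (fun d category =>
      match foodCategory.get? category with
      | some nutrient_type => d.modify nutrient_type [] (fun l => l ++ [category])
      | none => d)
    (PySem.Dict.mk [("carbohydrates", []), ("fat", []), ("protein", [])])).items

-- ===== PORT B =====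
def classify_food_choices_alt (food_choice : List String) : List (String × List String) :=
  ["carbohydrates", "fat", "protein"].map
    (fun n => (n, food_choice.filter (fun c => foodCategory.get? c == some n)))

-- ===== PRECONDITION & SPEC =====
def Spec_classify_food_choices (food_choice : List String) (out : List (String × List String)) : Prop := out = classify_food_choices_alt food_choice
instance (food_choice : List String) (out : List (String × List String)) : Decidable (Spec_classify_food_choices food_choice out) := by unfold Spec_classify_food_choices; infer_instance

-- ===== CLAIM (what is proved, stated in full; the proofs are below) =====
def Claim_equal_classify_food_choices : Prop := ∀ (food_choice : List String), Dom_classify_food_choices food_choice → Spec_classify_food_choices food_choice (classify_food_choices food_choice)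

-- ===== LEMMAS AND PROOFS =====

theorem foodCategory_values (x nt : String) (h : foodCategory.get? x = some nt) :
    nt = "carbohydrates" ∨ nt = "fat" ∨ nt = "protein" := by
  simp only [foodCategory, PySem.Dict.get?_mk_cons] at h
  split_ifs at h <;> simp_all [PySem.Dict.get?]

theorem classify_loop (fc : List String) (ca f p : List String) :
    (fc.foldl
      (fun d category =>
        match foodCategory.get? category with
        | some nutrient_type => d.modify nutrient_type [] (fun l => l ++ [category])
        | none => d)
      (PySem.Dict.mk [("carbohydrates", ca), ("fat", f), ("protein", p)])).items
    = [("carbohydrates", ca ++ fc.filter (fun c => foodCategory.get? c == some "carbohydrates")),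
       ("fat", f ++ fc.filter (fun c => foodCategory.get? c == some "fat")),
       ("protein", p ++ fc.filter (fun c => foodCategory.get? c == some "protein"))] := by
  induction fc generalizing ca f p with
  | nil => simp
  | cons x xs ih =>
    simp only [List.foldl_cons, List.filter_cons]
    cases h : foodCategory.get? x with
    | none => simp [ih]
    | some nt =>
      simp only [h]
      rcases foodCategory_values x nt h with rfl | rfl | rfl
      · exact (ih (ca ++ [x]) f p).trans (by simp)
      · exact (ih ca (f ++ [x]) p).trans (by simp)
      · exact (ih ca f (p ++ [x])).trans (by simp)

-- ===== VERDICT (by name: the statement is the Claim_ definition above) =====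
theorem classify_food_choices_spec : Claim_equal_classify_food_choices := by
  intro fc _
  unfold Spec_classify_food_choices classify_food_choices classify_food_choices_alt
  simp [classify_loop fc [] [] []]
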